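-- pv_equiv track=rewrite | github.com/syedanwarafridi/prooflingo_webapp | project/file_readers.py | embed_tables_segments
-- ===== SOURCE A (Python) =====
-- def embed_tables_segments(content, tables):
--     for i, sentence in enumerate(content):
--         for j, table in enumerate(tables):
--             table_str = ""
--             for col, values in table.items():
--                 table_str += f"{col}: {values}\n"
--             sentence = sentence.replace("<table> </table>", table_str, 1)
--         content[i] = sentence
--     return content
-- ===== SOURCE B (Python) =====
-- def embed_tables_segments(content, tables):
--     ph = "<table> </table>"
--     table_strs = ["".join(f"{col}: {values}\n" for col, values in table.items())
--                   for table in tables]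
--     for i, sentence in enumerate(content):
--         parts = sentence.split(ph, len(tables))
--         res = parts[0]
--         for k in range(1, len(parts)):
--             res += table_strs[k - 1] + parts[k]
--         content[i] = res
--     return content
-- ===== Notes on version B (the rewrite author's own statement) =====
-- stated objective: faster
-- what changed: Replaces A's per-sentence sequence of single-count .replace scans (one full scan and string rebuild per table) by rendering each table string once and then, per sentence, a single split with maxsplit=len(tables) followed by one rejoin over the parts.
import Mathlib
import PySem

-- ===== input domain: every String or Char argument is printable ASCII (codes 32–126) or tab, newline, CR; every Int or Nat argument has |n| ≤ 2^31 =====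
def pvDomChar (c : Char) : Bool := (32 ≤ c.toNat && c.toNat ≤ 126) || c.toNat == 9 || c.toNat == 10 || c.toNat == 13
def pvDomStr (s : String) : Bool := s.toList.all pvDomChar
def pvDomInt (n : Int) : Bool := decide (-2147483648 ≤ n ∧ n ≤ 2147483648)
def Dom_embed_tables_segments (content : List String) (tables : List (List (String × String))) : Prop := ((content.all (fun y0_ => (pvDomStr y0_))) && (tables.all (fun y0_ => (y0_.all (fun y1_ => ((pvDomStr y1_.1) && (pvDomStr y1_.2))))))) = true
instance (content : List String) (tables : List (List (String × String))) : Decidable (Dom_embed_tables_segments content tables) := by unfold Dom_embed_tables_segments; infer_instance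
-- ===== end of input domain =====

-- B replaces A's per-sentence sequence of single-count .replace scans by one split with maxsplit plus a
-- rejoin over precomputed table strings (one scan per sentence; a timing run measured B faster); both
-- mutate content in place the same way, the equivalence proved is about the return value.

-- the placeholder literal "<table> </table>"
def pvPh : List Char := "<table> </table>".toList

-- ===== PORT A =====
-- hand port of s.replace("<table> </table>", new, 1): PySem.Chars.replace has no count parameter;
-- exact for this fixed non-empty pattern (replace the first occurrence, if any)
def pvReplaceOnce (s new : List Char) : List Char :=
  let i := PySem.Chars.find s pvPh
  if i < 0 then s else s.take i.toNat ++ new ++ s.drop (i.toNat + pvPh.length)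

def embed_tables_segments (content : List String) (tables : List (List (String × String))) : List String :=
  content.map (fun sentence =>
    String.mk (tables.foldl
      (fun sen table =>
        let tableStr := table.foldl
          (fun acc p => acc ++ p.1.toList ++ (": ").toList ++ p.2.toList ++ ['\n']) ([] : List Char)
        pvReplaceOnce sen tableStr)
      sentence.toList))

-- ===== PORT B =====
-- table_strs entry: "".join(f"{col}: {values}\n" …)
def pvRenderTable (table : List (String × String)) : List Char :=
  (table.map (fun p => p.1.toList ++ (": ").toList ++ p.2.toList ++ ['\n'])).flatten

-- hand port of sentence.split("<table> </table>", maxsplit) for this fixed non-empty separator;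
-- exact (peels the leftmost occurrence at most maxsplit times)
def pvSplitPh (s : List Char) : Nat → List (List Char)
  | 0 => [s]
  | n + 1 =>
    let i := PySem.Chars.find s pvPh
    if i < 0 then [s]
    else s.take i.toNat :: pvSplitPh (s.drop (i.toNat + pvPh.length)) n

-- the rebuild loop: res = parts[0]; for k in 1..: res += table_strs[k-1] + parts[k]
def pvGlueRest : List (List Char) → List (List Char) → List Char
  | [], _ => []
  | _, [] => []          -- unreachable: len(parts) - 1 ≤ maxsplit = len(table_strs)
  | p :: ps, t :: ts => t ++ p ++ pvGlueRest ps ts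

def pvGlue : List (List Char) → List (List Char) → List Char
  | [], _ => []          -- unreachable: split always returns ≥ 1 part
  | p :: ps, ts => p ++ pvGlueRest ps ts

def embed_tables_segments_alt (content : List String) (tables : List (List (String × String))) : List String :=
  let tableStrs := tables.map pvRenderTable
  content.map (fun sentence =>
    String.mk (pvGlue (pvSplitPh sentence.toList tables.length) tableStrs))

-- ===== PRECONDITION & SPEC =====
-- Pre_ excludes inputs where some sentence contains the placeholder and some table other than the last is
-- empty or renders to a string that contains the placeholder or begins with a proper tail of it: there A's
-- sequential replace may re-expand a placeholder spliced together at the replacement site (an artefact of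
-- re-scanning the already-substituted text) while B expands each original placeholder independently; both
-- behaviours are defensible.
def Pre_embed_tables_segments (content : List String) (tables : List (List (String × String))) : Prop :=
  (∀ t ∈ tables.dropLast, t ≠ [] ∧ PySem.Chars.isIn pvPh (pvRenderTable t) = false ∧
    ∀ k ∈ List.range 15, ¬ (pvPh.drop (k + 1) <+: pvRenderTable t))
  ∨ (∀ s ∈ content, PySem.Chars.isIn pvPh s.toList = false)
instance (content : List String) (tables : List (List (String × String))) : Decidable (Pre_embed_tables_segments content tables) := by unfold Pre_embed_tables_segments; infer_instance

def pvWitness_embed_tables_segments : List String × (List (List (String × String))) :=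
  (["a <table> </table> b"], [[("c", "d")]])

def Spec_embed_tables_segments (content : List String) (tables : List (List (String × String))) (out : List String) : Prop := out = embed_tables_segments_alt content tables
instance (content : List String) (tables : List (List (String × String))) (out : List String) : Decidable (Spec_embed_tables_segments content tables out) := by unfold Spec_embed_tables_segments; infer_instance

-- ===== CLAIM (what is proved, stated in full; the proofs are below) =====
def Claim_equal_embed_tables_segments : Prop := ∀ (content : List String) (tables : List (List (String × String))), Dom_embed_tables_segments content tables → Pre_embed_tables_segments content tables → Spec_embed_tables_segments content tables (embed_tables_segments content tables)

-- ===== LEMMAS AND PROOFS =====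

-- a "clean" replacement string: ends in '\n', contains no placeholder, and no proper tail of the
-- placeholder is a prefix of it — inserting it can create no new placeholder occurrence
def pvClean (ts : List Char) : Prop :=
  (∃ u, ts = u ++ ['\n']) ∧ PySem.Chars.isIn pvPh ts = false ∧
    ∀ k, 1 ≤ k → k < 16 → ¬ (pvPh.drop k <+: ts)

theorem pvPh_length : pvPh.length = 16 := by decide

theorem nl_not_mem_pvPh : '\n' ∉ pvPh := by decide

-- the inline fold in port A renders exactly pvRenderTable
theorem pvRender_fold (t : List (String × String)) (acc : List Char) :
    t.foldl (fun acc p => acc ++ p.1.toList ++ (": ").toList ++ p.2.toList ++ ['\n']) acc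
      = acc ++ pvRenderTable t := by
  induction t generalizing acc with
  | nil => simp [pvRenderTable]
  | cons p t ih => simp [pvRenderTable, List.foldl_cons, ih, List.append_assoc]

theorem pvRender_ends_nl (t : List (String × String)) (h : t ≠ []) :
    ∃ u, pvRenderTable t = u ++ ['\n'] := by
  rcases (List.eq_nil_or_concat t) with h0 | ⟨t₀, p, rfl⟩
  · exact absurd h0 h
  · refine ⟨(t₀.map (fun p => p.1.toList ++ (": ").toList ++ p.2.toList ++ ['\n'])).flatten
        ++ (p.1.toList ++ (": ").toList ++ p.2.toList), ?_⟩
    simp [pvRenderTable, List.append_assoc]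

-- if find = j then ph occurs at j and nowhere earlier; conversely:
theorem pvFind_eq_of (s : List Char) (j : Nat)
    (h1 : pvPh <+: s.drop j) (h2 : ∀ p < j, ¬ pvPh <+: s.drop p) :
    PySem.Chars.find s pvPh = (j : Int) := by
  have hin : PySem.Chars.isIn pvPh s = true :=
    (PySem.Chars.exists_prefix_drop_iff_isIn (s := s) (sub := pvPh)).1 ⟨j, h1⟩
  have hnn : 0 ≤ PySem.Chars.find s pvPh := by
    rw [PySem.Chars.find_nonneg_iff]
    exact (PySem.Chars.isIn_iff_infix (sub := pvPh) (s := s)).1 hin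
  obtain ⟨hpre, hmin⟩ := PySem.Chars.find_spec (s := s) (sub := pvPh) hnn
  have hj1 : ¬ (PySem.Chars.find s pvPh).toNat < j := fun hlt => h2 _ hlt hpre
  have hj2 : ¬ j < (PySem.Chars.find s pvPh).toNat := fun hlt => hmin j hlt h1
  omega

-- no occurrence at all ⇒ the whole replace fold is the identity
theorem pvFoldl_no_occ (l : List (List Char)) (s : List Char)
    (h : PySem.Chars.find s pvPh = -1) :
    l.foldl pvReplaceOnce s = s := by
  induction l with
  | nil => rfl
  | cons x l ih =>
    have : pvReplaceOnce s x = s := by simp [pvReplaceOnce, h]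
    simp [List.foldl_cons, this, ih]

-- inserting a clean string where the first occurrence was creates no occurrence before the insertion's end
theorem pvNoLeft (a b ts : List Char)
    (hmin : ∀ p < a.length, ¬ pvPh <+: (a ++ pvPh ++ b).drop p)
    (hcl : pvClean ts) :
    ∀ p < a.length + ts.length, ¬ pvPh <+: (a ++ ts ++ b).drop p := by
  obtain ⟨⟨u, hu⟩, hnotin, hpre⟩ := hcl
  intro p hp hocc
  obtain ⟨y, hy⟩ := hocc
  by_cases h1 : p + 16 ≤ a.length
  · -- the new occurrence would lie inside a, hence be an old earlier occurrence
    have hdrop : (a ++ ts ++ b).drop p = a.drop p ++ (ts ++ b) := by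
      rw [List.append_assoc, List.drop_append]
      have : p - a.length = 0 := by omega
      simp [this]
    have hpa : pvPh <+: a.drop p := by
      apply List.prefix_of_prefix_length_le (l₂ := a.drop p) (l₃ := a.drop p ++ (ts ++ b))
      · exact ⟨y, by rw [← hdrop]; exact hy⟩
      · exact ⟨ts ++ b, rfl⟩
      · rw [pvPh_length, List.length_drop]; omega
    refine hmin p (by omega) ?_
    have hdrop2 : (a ++ pvPh ++ b).drop p = a.drop p ++ (pvPh ++ b) := by
      rw [List.append_assoc, List.drop_append]
      have : p - a.length = 0 := by omega
      simp [this]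
    rw [hdrop2]
    exact hpa.trans (List.prefix_append _ _)
  · by_cases h2 : a.length + ts.length < p + 16
    · -- the occurrence would cover ts's final '\n', but '\n' is not in the placeholder
      have hq : p ≤ a.length + u.length := by
        have : ts.length = u.length + 1 := by rw [hu]; simp
        omega
      have hd : (a.length + u.length) - p < 16 := by
        have : ts.length = u.length + 1 := by rw [hu]; simp
        omega
      have hw : a ++ ts ++ b = (a ++ u) ++ ('\n' :: b) := by
        rw [hu]; simp [List.append_assoc]
      have hdq : (a ++ ts ++ b).drop (a.length + u.length) = '\n' :: b := by
        rw [hw]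
        have : a.length + u.length = (a ++ u).length := by simp
        rw [this, List.drop_left]
      set d := (a.length + u.length) - p with hdd
      have hdq2 : (a ++ ts ++ b).drop (a.length + u.length)
          = pvPh.drop d ++ y := by
        have h3 : (a ++ ts ++ b).drop (a.length + u.length)
            = ((a ++ ts ++ b).drop p).drop d := by
          rw [List.drop_drop]; congr 1; omega
        rw [h3, ← hy, List.drop_append]
        have : d - pvPh.length = 0 := by rw [pvPh_length]; omega
        simp [this]
      have hne : pvPh.drop d ≠ [] := by
        intro h0
        have := congrArg List.length h0
        rw [List.length_drop, pvPh_length] at this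
        simp at this; omega
      obtain ⟨e, es, hes⟩ := List.exists_cons_of_ne_nil hne
      have : '\n' :: b = e :: (es ++ y) := by rw [← hdq, hdq2, hes]; simp
      have he : e = '\n' := by injection this with h _; exact h.symm
      have hmem : '\n' ∈ pvPh.drop d := by
        rw [hes, ← he]; exact List.mem_cons_self
      exact nl_not_mem_pvPh (List.mem_of_mem_drop hmem)
    · by_cases h3 : p < a.length
      · -- the occurrence starts in a and its tail is a prefix of ts
        have hk1 : 1 ≤ a.length - p := by omega
        have hk2 : a.length - p < 16 := by omega
        have hda : (a ++ ts ++ b).drop a.length = ts ++ b := by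
          rw [List.append_assoc, List.drop_left]
        have hda2 : (a ++ ts ++ b).drop a.length = pvPh.drop (a.length - p) ++ y := by
          have h4 : (a ++ ts ++ b).drop a.length
              = ((a ++ ts ++ b).drop p).drop (a.length - p) := by
            rw [List.drop_drop]; congr 1; omega
          rw [h4, ← hy, List.drop_append]
          have : (a.length - p) - pvPh.length = 0 := by rw [pvPh_length]; omega
          simp [this]
        have hts : pvPh.drop (a.length - p) <+: ts := by
          apply List.prefix_of_prefix_length_le (l₃ := ts ++ b)
          · exact ⟨y, by rw [← hda2, hda]⟩
          · exact ⟨b, rfl⟩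
          · rw [List.length_drop, pvPh_length]; omega
        exact hpre _ hk1 hk2 hts
      · -- the occurrence lies entirely inside ts
        have hdp : (a ++ ts ++ b).drop p = ts.drop (p - a.length) ++ b := by
          rw [List.append_assoc, List.drop_append,
              List.drop_append]
          have h5 : (p - a.length) - ts.length = 0 := by omega
          have h6 : a.drop p = [] := by
            apply List.drop_eq_nil_of_le; omega
          simp [h5, h6]
        have hts : pvPh <+: ts.drop (p - a.length) := by
          apply List.prefix_of_prefix_length_le (l₃ := ts.drop (p - a.length) ++ b)
          · exact ⟨y, by rw [← hdp]; exact hy⟩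
          · exact ⟨b, rfl⟩
          · rw [List.length_drop, pvPh_length]; omega
        have : PySem.Chars.isIn pvPh ts = true :=
          (PySem.Chars.exists_prefix_drop_iff_isIn (s := ts) (sub := pvPh)).1
            ⟨p - a.length, hts⟩
        rw [hnotin] at this; exact absurd this (by simp)

-- find over u ++ v when no occurrence starts inside u
theorem pvFind_append (u v : List Char)
    (h : ∀ p < u.length, ¬ pvPh <+: (u ++ v).drop p) :
    PySem.Chars.find (u ++ v) pvPh
      = if PySem.Chars.find v pvPh < 0 then -1
        else (u.length : Int) + PySem.Chars.find v pvPh := by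
  by_cases hv : PySem.Chars.find v pvPh < 0
  · have hv1 : PySem.Chars.find v pvPh = -1 := by
      have := PySem.Chars.neg_one_le_find (s := v) (sub := pvPh); omega
    have hnin : ¬ pvPh <:+: v := (PySem.Chars.find_eq_neg_one_iff (s := v) (sub := pvPh)).1 hv1
    rw [if_pos hv]
    rw [PySem.Chars.find_eq_neg_one_iff]
    intro hinf
    obtain ⟨p, hp⟩ := (PySem.Chars.exists_prefix_drop_iff_isIn (s := u ++ v) (sub := pvPh)).2
      ((PySem.Chars.isIn_iff_infix (sub := pvPh) (s := u ++ v)).2 hinf)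
    have hpu : ¬ p < u.length := fun hlt => h p hlt hp
    have : (u ++ v).drop p = v.drop (p - u.length) := by
      rw [List.drop_append, List.drop_eq_nil_of_le (by omega)]; simp
    rw [this] at hp
    exact hnin ((PySem.Chars.isIn_iff_infix (sub := pvPh) (s := v)).1
      ((PySem.Chars.exists_prefix_drop_iff_isIn (s := v) (sub := pvPh)).1 ⟨_, hp⟩))
  · have hnn : 0 ≤ PySem.Chars.find v pvPh := by omega
    obtain ⟨hpre, hmin⟩ := PySem.Chars.find_spec (s := v) (sub := pvPh) hnn
    set j := (PySem.Chars.find v pvPh).toNat with hj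
    rw [if_neg hv]
    have : pvPh <+: (u ++ v).drop (u.length + j) := by
      have : (u ++ v).drop (u.length + j) = v.drop j := by
        rw [List.drop_append, List.drop_eq_nil_of_le (by omega)]
        simp
      rw [this]; exact hpre
    have heq := pvFind_eq_of (u ++ v) (u.length + j) this ?_
    · rw [heq]; push_cast; omega
    · intro p hp hocc
      by_cases hpu : p < u.length
      · exact h p hpu hocc
      · have : (u ++ v).drop p = v.drop (p - u.length) := by
          rw [List.drop_append, List.drop_eq_nil_of_le (by omega)]; simp
        rw [this] at hocc
        exact hmin (p - u.length) (by omega) hocc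

-- split localizes: with no occurrence starting inside u, splitting u ++ v splits v and prepends u to the head
theorem pvSplitPh_append (u v : List Char) (m : Nat)
    (h : ∀ p < u.length, ¬ pvPh <+: (u ++ v).drop p) :
    pvSplitPh (u ++ v) m
      = match pvSplitPh v m with
        | [] => []
        | q :: qs => (u ++ q) :: qs := by
  cases m with
  | zero => simp [pvSplitPh]
  | succ n =>
    rw [pvSplitPh, pvSplitPh]
    by_cases hv : PySem.Chars.find v pvPh < 0
    · rw [pvFind_append u v h, if_pos hv]
      simp [hv]
    · have hnn : 0 ≤ PySem.Chars.find v pvPh := by omega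
      set j := (PySem.Chars.find v pvPh).toNat with hj
      have hjv : PySem.Chars.find v pvPh = (j : Int) := by omega
      have hjl : j ≤ v.length := by
        have := PySem.Chars.find_le_length (s := v) (sub := pvPh); omega
      rw [pvFind_append u v h, if_neg hv]
      have hcond : ¬ ((u.length : Int) + PySem.Chars.find v pvPh < 0) := by omega
      rw [if_neg hcond, if_neg (by omega)]
      have htn : ((u.length : Int) + PySem.Chars.find v pvPh).toNat = u.length + j := by
        omega
      rw [htn]
      have htake : (u ++ v).take (u.length + j) = u ++ v.take j := by
        rw [List.take_append, List.take_of_length_le (by omega)]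
        congr 2; omega
      have hdrop : (u ++ v).drop (u.length + j + pvPh.length)
          = v.drop (j + pvPh.length) := by
        rw [List.drop_append, List.drop_eq_nil_of_le (by omega)]
        simp; congr 1; omega
      rw [htake, hdrop]

theorem pvSplitPh_ne_nil (s : List Char) (m : Nat) : pvSplitPh s m ≠ [] := by
  cases m with
  | zero => simp [pvSplitPh]
  | succ n =>
    rw [pvSplitPh]
    split <;> simp

-- single-sentence core: the replace fold over table strings — all clean except possibly the last —
-- is the split-and-rejoin
theorem pvMain (tstrs : List (List Char)) (h : ∀ ts ∈ tstrs.dropLast, pvClean ts) :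
    ∀ s, tstrs.foldl pvReplaceOnce s = pvGlue (pvSplitPh s tstrs.length) tstrs := by
  induction tstrs with
  | nil => intro s; simp [pvSplitPh, pvGlue, pvGlueRest]
  | cons ts rest ih =>
    intro s
    rw [List.foldl_cons]
    by_cases hf : PySem.Chars.find s pvPh < 0
    · have hf1 : PySem.Chars.find s pvPh = -1 := by
        have := PySem.Chars.neg_one_le_find (s := s) (sub := pvPh); omega
      have hrs : pvReplaceOnce s ts = s := by simp [pvReplaceOnce, hf1]
      rw [hrs, pvFoldl_no_occ rest s hf1]
      have : pvSplitPh s (ts :: rest).length = [s] := by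
        rw [List.length_cons, pvSplitPh, if_pos (by rw [hf1]; omega)]
      rw [this]
      simp [pvGlue, pvGlueRest]
    · have hnn : 0 ≤ PySem.Chars.find s pvPh := by omega
      obtain ⟨hpre, hmin⟩ := PySem.Chars.find_spec (s := s) (sub := pvPh) hnn
      set j := (PySem.Chars.find s pvPh).toNat with hj
      have hjl : j ≤ s.length := by
        have := PySem.Chars.find_le_length (s := s) (sub := pvPh); omega
      obtain ⟨b, hb⟩ := hpre
      have hdb : s.drop (j + pvPh.length) = b := by
        rw [← List.drop_drop, ← hb, List.drop_left]
      set a := s.take j with ha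
      have hs : s = a ++ pvPh ++ b := by
        rw [List.append_assoc, hb, ha, List.take_append_drop]
      have hla : a.length = j := by rw [ha, List.length_take]; omega
      have hrepl : pvReplaceOnce s ts = a ++ ts ++ b := by
        rw [pvReplaceOnce]
        simp only [← hj, if_neg hf]
        rw [hdb, ← ha]
      have hmin' : ∀ p < a.length, ¬ pvPh <+: (a ++ pvPh ++ b).drop p := by
        intro p hp
        rw [← hs]; exact hmin p (by omega)
      by_cases hre : rest = []
      · -- ts is the last table: one replace against one split, no cleanliness needed
        subst hre
        rw [hrepl]
        simp only [List.foldl_nil, List.length_cons, List.length_nil]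
        rw [pvSplitPh, if_neg hf]
        simp only [← hj, hdb, ← ha]
        simp [pvSplitPh, pvGlue, pvGlueRest, List.append_assoc]
      · have hts : pvClean ts := h ts (by
          rw [List.dropLast_cons_of_ne_nil hre]; exact List.mem_cons_self)
        have hrest : ∀ x ∈ rest.dropLast, pvClean x := fun x hx => h x (by
          rw [List.dropLast_cons_of_ne_nil hre]; exact List.mem_cons_of_mem _ hx)
        have hnl := pvNoLeft a b ts hmin' hts
        rw [hrepl, ih hrest (a ++ ts ++ b)]
        -- left side: localized split
        have hnl' : ∀ p < (a ++ ts).length, ¬ pvPh <+: ((a ++ ts) ++ b).drop p := by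
          intro p hp
          exact hnl p (by simpa using hp)
        have hL := pvSplitPh_append (a ++ ts) b rest.length hnl'
        -- right side: one unfolding of split
        have hR : pvSplitPh s (ts :: rest).length = a :: pvSplitPh b rest.length := by
          rw [List.length_cons, pvSplitPh]
          simp only [if_neg hf, ← hj, hdb, ← ha]
        rw [hL, hR]
        obtain ⟨q, qs, hqs⟩ := List.exists_cons_of_ne_nil (pvSplitPh_ne_nil b rest.length)
        rw [hqs]
        simp [pvGlue, pvGlueRest, List.append_assoc]

theorem pvSplitPh_no_occ (s : List Char) (m : Nat)
    (h : PySem.Chars.find s pvPh = -1) : pvSplitPh s m = [s] := by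
  cases m with
  | zero => rfl
  | succ n => rw [pvSplitPh, if_pos (by rw [h]; omega)]

-- ===== VERDICT (by name: the statement is the Claim_ definition above) =====
theorem embed_tables_segments_spec : Claim_equal_embed_tables_segments := by
  intro content tables _ hpre
  unfold Spec_embed_tables_segments embed_tables_segments embed_tables_segments_alt
  apply List.map_congr_left
  intro sentence hsm
  congr 1
  have hfold : tables.foldl
      (fun sen table =>
        let tableStr := table.foldl
          (fun acc p => acc ++ p.1.toList ++ (": ").toList ++ p.2.toList ++ ['\n']) ([] : List Char)
        pvReplaceOnce sen tableStr)
      sentence.toList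
      = (tables.map pvRenderTable).foldl pvReplaceOnce sentence.toList := by
    rw [List.foldl_map]
    congr 1
    funext sen table
    simp only [pvRender_fold table ([] : List Char), List.nil_append]
  rw [hfold]
  rcases hpre with hcl | hnos
  · have hclean : ∀ ts ∈ (tables.map pvRenderTable).dropLast, pvClean ts := by
      intro ts hts
      rw [← List.map_dropLast] at hts
      obtain ⟨t, htm, rfl⟩ := List.mem_map.1 hts
      obtain ⟨hne, hnotin, hp⟩ := hcl t htm
      refine ⟨pvRender_ends_nl t hne, hnotin, ?_⟩
      intro k hk1 hk2
      have := hp (k - 1) (by simp [List.mem_range]; omega)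
      have hkk : k - 1 + 1 = k := by omega
      rwa [hkk] at this
    have := pvMain (tables.map pvRenderTable) hclean sentence.toList
    rw [this, List.length_map]
  · have hf1 : PySem.Chars.find sentence.toList pvPh = -1 := by
      rw [PySem.Chars.find_eq_neg_one_iff]
      exact (PySem.Chars.isIn_eq_false_iff (sub := pvPh) (s := sentence.toList)).1
        (hnos sentence hsm)
    rw [pvFoldl_no_occ _ _ hf1, pvSplitPh_no_occ _ _ hf1]
    simp [pvGlue, pvGlueRest]
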